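-- pv_equiv track=rewrite | github.com/SakshamMishra2023/Pdf-outliner | tx.py | group_headings_by_page
-- ===== SOURCE A (Python) =====
-- from collections import Counter, defaultdict
-- from typing import List, Dict, Tuple, Optional
--
-- def group_headings_by_page(outline: List[Dict]) -> Dict[int, List[Dict]]:
--     page_headings = defaultdict(list)
--     for heading in outline:
--         page_num = heading['page']
--         page_headings[page_num].append(heading)
--     for page_num in page_headings:
--         page_headings[page_num].sort(key=lambda x: x.get('original_order', 0))
--     return dict(page_headings)
-- ===== SOURCE B (Python) =====
-- def group_headings_by_page(outline):
--     # Per-page: collect distinct pages in first-occurrence order, then for each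
--     # page select and sort its headings directly from the outline (no dict of lists).
--     pages = list(dict.fromkeys(h['page'] for h in outline))
--     return {p: sorted((h for h in outline if h['page'] == p),
--                       key=lambda x: x.get('original_order', 0))
--             for p in pages}
-- ===== Notes on version B (the rewrite author's own statement) =====
-- stated objective: alternative
-- what changed: B builds no dict of accumulating lists: it lists the distinct pages in first-occurrence order, then for each page filters the outline and sorts that selection, trading A's single grouping pass for a per-page scan.
import Mathlib
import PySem

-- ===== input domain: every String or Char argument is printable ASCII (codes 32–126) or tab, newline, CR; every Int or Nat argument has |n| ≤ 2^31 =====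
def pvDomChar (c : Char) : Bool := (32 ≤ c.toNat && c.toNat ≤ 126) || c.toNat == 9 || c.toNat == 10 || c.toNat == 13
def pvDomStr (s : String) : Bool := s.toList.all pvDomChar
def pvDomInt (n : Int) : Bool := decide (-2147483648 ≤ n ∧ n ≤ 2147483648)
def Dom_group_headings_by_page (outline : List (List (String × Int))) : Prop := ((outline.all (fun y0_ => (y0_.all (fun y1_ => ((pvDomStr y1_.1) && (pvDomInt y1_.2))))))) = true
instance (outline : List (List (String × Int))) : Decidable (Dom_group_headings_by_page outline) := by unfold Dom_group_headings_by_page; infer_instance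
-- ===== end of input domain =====

-- B drops A's dict of accumulating lists: it lists the distinct pages in first-occurrence
-- order and, per page, filters the outline and sorts the selection; equal return values
-- are proved on Pre_ (every heading has a 'page' key).

-- shared helpers: heading['page'] (KeyError outside Pre_, the 0 default is unreachable inside Pre_)
-- and heading.get('original_order', 0)
def pvPage (h : List (String × Int)) : Int :=
  ((PySem.Dict.get? ⟨h⟩ "page")).getD 0
def pvOrd (h : List (String × Int)) : Int :=
  PySem.Dict.getD ⟨h⟩ "original_order" 0

-- ===== PORT A =====
def group_headings_by_page (outline : List (List (String × Int))) : List (Int × List (List (String × Int))) :=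
  -- defaultdict(list): page_headings[page_num].append(heading)
  let d : PySem.Dict Int (List (List (String × Int))) :=
    outline.foldl (fun d h => d.insert (pvPage h) (d.getD (pvPage h) [] ++ [h])) ⟨[]⟩
  -- 'for page_num in page_headings: page_headings[page_num].sort(key=…)': keys are distinct,
  -- so sorting each key's list in place is the map over the dict's items
  d.items.map (fun kv => (kv.1, PySem.List.sorted kv.2 pvOrd false))

-- ===== PORT B =====
def group_headings_by_page_alt (outline : List (List (String × Int))) : List (Int × List (List (String × Int))) :=
  -- pages = list(dict.fromkeys(h['page'] for h in outline))
  let pages : List Int := PySem.List.dedup (outline.map pvPage)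
  -- {p: sorted((h for h in outline if h['page'] == p), key=…) for p in pages}
  pages.map (fun p =>
    (p, PySem.List.sorted (outline.filter (fun h => pvPage h == p)) pvOrd false))

-- ===== PRECONDITION & SPEC =====
-- Pre_ excludes exactly the headings on which heading['page'] raises KeyError in A (and in B).
def Pre_group_headings_by_page (outline : List (List (String × Int))) : Prop :=
  outline.all (fun h => PySem.Dict.contains ⟨h⟩ "page") = true
instance (outline : List (List (String × Int))) : Decidable (Pre_group_headings_by_page outline) := by
  unfold Pre_group_headings_by_page; infer_instance
def pvWitness_group_headings_by_page : (List (List (String × Int))) :=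
  [[("page", 1), ("original_order", 2)], [("page", 0)], [("page", 1), ("original_order", 1)]]

def Spec_group_headings_by_page (outline : List (List (String × Int))) (out : List (Int × List (List (String × Int)))) : Prop := out = group_headings_by_page_alt outline
instance (outline : List (List (String × Int))) (out : List (Int × List (List (String × Int)))) : Decidable (Spec_group_headings_by_page outline out) := by unfold Spec_group_headings_by_page; infer_instance

-- ===== CLAIM (what is proved, stated in full; the proofs are below) =====
def Claim_equal_group_headings_by_page : Prop := ∀ (outline : List (List (String × Int))), Dom_group_headings_by_page outline → Pre_group_headings_by_page outline → Spec_group_headings_by_page outline (group_headings_by_page outline)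

-- ===== LEMMAS AND PROOFS =====

-- value of A's append-grouping fold at any key is the filter of the input
theorem pv_getD_foldl_append (l : List (List (String × Int)))
    (d : PySem.Dict Int (List (List (String × Int)))) (k : Int) :
    (l.foldl (fun d h => d.insert (pvPage h) (d.getD (pvPage h) [] ++ [h])) d).getD k []
      = d.getD k [] ++ l.filter (fun h => pvPage h == k) := by
  induction l generalizing d with
  | nil => simp
  | cons h t ih =>
    simp only [List.foldl_cons, List.filter, ih]
    rw [PySem.Dict.getD_insert]
    by_cases hk : k = pvPage h
    · subst hk; simp
    · have : (pvPage h == k) = false := by simpa using fun e => hk e.symm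
      simp [hk, this]

-- ===== VERDICT (by name: the statement is the Claim_ definition above) =====
theorem group_headings_by_page_spec : Claim_equal_group_headings_by_page := by
  intro outline _ _
  unfold Spec_group_headings_by_page
  simp only [group_headings_by_page, group_headings_by_page_alt]
  set dA := outline.foldl (fun d h => d.insert (pvPage h) (d.getD (pvPage h) [] ++ [h]))
    (⟨[]⟩ : PySem.Dict Int (List (List (String × Int)))) with hdA
  have hKA : dA.keys = PySem.Set.ofList (outline.map pvPage) := by
    rw [hdA, PySem.Dict.keys_foldl_insert_key]; rfl
  have hnodA : dA.keys.Nodup := by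
    rw [hKA]; exact PySem.Set.nodup_ofList _
  rw [PySem.Dict.items_eq_map_keys dA hnodA [], List.map_map, hKA, PySem.List.dedup_eq_ofList]
  apply List.map_congr_left
  intro k _
  simp only [Function.comp]
  congr 1
  rw [hdA, pv_getD_foldl_append]
  rfl
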